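-- pv_equiv track=rewrite | github.com/debdattasarkar/DSA | 2. GFG/0. All/1. Arrays/(B) Merge and Sort/py_sort_heap.py | mergeNsort
-- ===== SOURCE A (Python) =====
-- import heapq
--
-- def mergeNsort(arr, brr):
--     # Write your code here
--     # Step 1: Combine both arrays
--     combined = arr + brr
--
--     # Step 2: Remove duplicates using set
--     unique = set(combined)
--
--     # Step 3: Convert set to a list and heapify it
--     heap = list(unique)
--     heapq.heapify(heap)  # O(n)
--
--     # Step 4: Pop elements in sorted order
--     result = []
--     while heap:
--         result.append(heapq.heappop(heap))  # O(log n) per pop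
--
--     return result
-- ===== SOURCE B (Python) =====
-- def mergeNsort(arr, brr):
--     return sorted(set(arr + brr))
-- ===== Notes on version B (the rewrite author's own statement) =====
-- stated objective: simpler
-- what changed: B drops the heap and its pop loop entirely, returning sorted(set(arr + brr)) via a single comparison sort over the unique values.
import Mathlib
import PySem

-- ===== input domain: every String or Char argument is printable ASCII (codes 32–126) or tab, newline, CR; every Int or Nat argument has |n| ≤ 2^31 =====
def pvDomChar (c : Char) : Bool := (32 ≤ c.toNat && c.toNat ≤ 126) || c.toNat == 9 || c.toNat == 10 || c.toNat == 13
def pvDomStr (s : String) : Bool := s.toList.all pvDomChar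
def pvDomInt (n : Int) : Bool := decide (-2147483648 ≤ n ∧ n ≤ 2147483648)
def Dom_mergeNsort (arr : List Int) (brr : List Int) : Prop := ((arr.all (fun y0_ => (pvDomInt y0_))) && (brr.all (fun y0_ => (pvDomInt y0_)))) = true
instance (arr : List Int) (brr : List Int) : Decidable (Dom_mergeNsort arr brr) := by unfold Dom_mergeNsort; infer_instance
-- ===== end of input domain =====

-- B replaces A's heapify + repeated-heappop extraction loop by a single sort of the
-- deduplicated list: simpler, no priority queue, no pop loop.

-- ===== PORT A =====
-- A's heap is consumed only through heappop, whose contract is "remove and return the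
-- minimum"; the while-loop is ported as repeated minimum extraction (exact here: the
-- heap holds distinct ints and the result is the sorted sequence of pops).
def popLoop (heap : List Int) (result : List Int) : List Int :=
  match h : PySem.List.min? heap (fun x => x) with
  | none => result
  | some m => popLoop (heap.erase m) (result ++ [m])
  termination_by heap.length
  decreasing_by
    have hm : m ∈ heap := PySem.List.min?_mem h
    have := List.length_erase_of_mem hm
    have hpos : 0 < heap.length := List.length_pos_of_mem hm
    omega

def mergeNsort (arr : List Int) (brr : List Int) : List Int :=
  let combined := arr ++ brr
  let unique : PySem.Set Int := PySem.Set.ofList combined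
  popLoop unique []

-- ===== PORT B =====
def mergeNsort_alt (arr : List Int) (brr : List Int) : List Int :=
  PySem.List.sorted (PySem.Set.ofList (arr ++ brr)) (fun x => x) false

-- ===== PRECONDITION & SPEC =====
def Spec_mergeNsort (arr : List Int) (brr : List Int) (out : List Int) : Prop := out = mergeNsort_alt arr brr
instance (arr : List Int) (brr : List Int) (out : List Int) : Decidable (Spec_mergeNsort arr brr out) := by unfold Spec_mergeNsort; infer_instance

-- ===== CLAIM (what is proved, stated in full; the proofs are below) =====
def Claim_equal_mergeNsort : Prop := ∀ (arr : List Int) (brr : List Int), Dom_mergeNsort arr brr → Spec_mergeNsort arr brr (mergeNsort arr brr)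

-- ===== LEMMAS AND PROOFS =====

theorem popLoop_acc (xs acc : List Int) : popLoop xs acc = acc ++ popLoop xs [] := by
  induction hn : xs.length using Nat.strong_induction_on generalizing xs acc with
  | _ n ih =>
    rw [popLoop, popLoop]
    cases h : PySem.List.min? xs (fun x => x) with
    | none => simp
    | some m =>
      have hm : m ∈ xs := PySem.List.min?_mem h
      have hlt : (xs.erase m).length < n := by
        have := List.length_erase_of_mem hm
        have hpos : 0 < xs.length := List.length_pos_of_mem hm
        omega
      dsimp only
      rw [ih _ hlt _ (acc ++ [m]) rfl, ih _ hlt _ ([] ++ [m]) rfl]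
      simp

theorem popLoop_perm (xs : List Int) : (popLoop xs []).Perm xs := by
  induction hn : xs.length using Nat.strong_induction_on generalizing xs with
  | _ n ih =>
    rw [popLoop]
    cases h : PySem.List.min? xs (fun x => x) with
    | none =>
      have : xs = [] := (PySem.List.min?_eq_none_iff _ _).1 h
      simp [this]
    | some m =>
      have hm : m ∈ xs := PySem.List.min?_mem h
      have hlt : (xs.erase m).length < n := by
        have := List.length_erase_of_mem hm
        have hpos : 0 < xs.length := List.length_pos_of_mem hm
        omega
      dsimp only
      rw [popLoop_acc]
      have hp := ih _ hlt _ rfl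
      have : (m :: popLoop (xs.erase m) []).Perm (m :: xs.erase m) := hp.cons m
      simpa using this.trans (List.perm_cons_erase hm).symm

theorem popLoop_sorted (xs : List Int) : (popLoop xs []).Pairwise (· ≤ ·) := by
  induction hn : xs.length using Nat.strong_induction_on generalizing xs with
  | _ n ih =>
    rw [popLoop]
    cases h : PySem.List.min? xs (fun x => x) with
    | none => simp
    | some m =>
      have hm : m ∈ xs := PySem.List.min?_mem h
      have hlt : (xs.erase m).length < n := by
        have := List.length_erase_of_mem hm
        have hpos : 0 < xs.length := List.length_pos_of_mem hm
        omega
      dsimp only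
      rw [popLoop_acc]
      simp only [List.nil_append, List.singleton_append, List.pairwise_cons]
      refine ⟨?_, ih _ hlt _ rfl⟩
      intro y hy
      have hymem : y ∈ xs.erase m := (popLoop_perm _).mem_iff.1 hy
      exact PySem.List.min?_isMin h y (List.mem_of_mem_erase hymem)

-- ===== VERDICT (by name: the statement is the Claim_ definition above) =====
theorem mergeNsort_spec : Claim_equal_mergeNsort := by
  intro arr brr _
  unfold Spec_mergeNsort mergeNsort mergeNsort_alt
  exact (PySem.List.sorted_id_eq_of_perm_of_pairwise _ _ (popLoop_perm _) (popLoop_sorted _)).symm
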